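-- pv_equiv track=rewrite | github.com/gigo-gigo/atcoder | abc/abc436/c.py | solve
-- ===== SOURCE A (Python) =====
-- def solve(RC):
--     blocks = set()
--     ans = 0
--     for r, c in RC:
--         if (
--             (r, c) in blocks
--             or (r, c + 1) in blocks
--             or (r + 1, c) in blocks
--             or (r + 1, c + 1) in blocks
--         ):
--             continue
--         blocks.add((r, c))
--         blocks.add((r, c + 1))
--         blocks.add((r + 1, c))
--         blocks.add((r + 1, c + 1))
--         ans += 1
--
--     return ans
-- ===== SOURCE B (Python) =====
-- def solve(RC):
--     anchors = set()
--     ans = 0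
--     for r, c in RC:
--         if any((r + dr, c + dc) in anchors for dr in (-1, 0, 1) for dc in (-1, 0, 1)):
--             continue
--         anchors.add((r, c))
--         ans += 1
--     return ans
-- ===== Notes on version B (the rewrite author's own statement) =====
-- stated objective: alternative
-- what changed: B keeps a set of placed 2x2 block anchors (top-left corners) and rejects a candidate iff one of the 9 anchors within Chebyshev distance 1 is present, instead of A's set of all occupied cells with 4 insertions and 4 cell lookups per placement.
import Mathlib
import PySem

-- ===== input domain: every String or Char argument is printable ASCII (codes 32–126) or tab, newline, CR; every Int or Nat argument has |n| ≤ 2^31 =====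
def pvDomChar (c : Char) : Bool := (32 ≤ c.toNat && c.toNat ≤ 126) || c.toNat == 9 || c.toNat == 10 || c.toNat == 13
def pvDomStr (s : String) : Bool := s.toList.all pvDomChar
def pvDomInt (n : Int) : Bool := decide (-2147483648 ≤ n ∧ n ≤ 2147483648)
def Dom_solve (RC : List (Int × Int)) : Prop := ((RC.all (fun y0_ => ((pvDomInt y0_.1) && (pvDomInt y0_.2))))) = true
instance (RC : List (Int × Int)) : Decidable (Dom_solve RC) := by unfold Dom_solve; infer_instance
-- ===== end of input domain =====

-- B tracks only the 2x2 blocks' top-left anchors and tests the 9 nearby candidate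
-- anchors, instead of A's set of all occupied cells; objective: alternative (a block
-- overlaps an existing one iff some anchor is within 1 in both coordinates).


-- ===== PORT A =====
-- one iteration of A's loop: blocks = set of occupied cells
def stepA (st : PySem.Set (Int × Int) × Int) (rc : Int × Int) : PySem.Set (Int × Int) × Int :=
  let r := rc.1
  let c := rc.2
  if st.1.contains (r, c) || st.1.contains (r, c + 1) ||
     st.1.contains (r + 1, c) || st.1.contains (r + 1, c + 1) then
    st
  else
    (((((st.1.add (r, c)).add (r, c + 1)).add (r + 1, c)).add (r + 1, c + 1)), st.2 + 1)

def solve (RC : List (Int × Int)) : Int :=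
  (RC.foldl stepA (PySem.Set.empty, 0)).2

-- ===== PORT B =====
-- one iteration of B's loop: anchors = set of placed top-left corners;
-- the 'any(... for dr ... for dc ...)' generator is the nested List.any below
def stepB (st : PySem.Set (Int × Int) × Int) (rc : Int × Int) : PySem.Set (Int × Int) × Int :=
  let r := rc.1
  let c := rc.2
  if ([-1, 0, 1] : List Int).any (fun dr =>
       ([-1, 0, 1] : List Int).any (fun dc => st.1.contains (r + dr, c + dc))) then
    st
  else
    (st.1.add (r, c), st.2 + 1)

def solve_alt (RC : List (Int × Int)) : Int :=
  (RC.foldl stepB (PySem.Set.empty, 0)).2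

-- ===== PRECONDITION & SPEC =====
def Spec_solve (RC : List (Int × Int)) (out : Int) : Prop := out = solve_alt RC
instance (RC : List (Int × Int)) (out : Int) : Decidable (Spec_solve RC out) := by unfold Spec_solve; infer_instance

-- ===== CLAIM (what is proved, stated in full; the proofs are below) =====
def Claim_equal_solve : Prop := ∀ (RC : List (Int × Int)), Dom_solve RC → Spec_solve RC (solve RC)

-- ===== LEMMAS AND PROOFS =====

-- cell set of A ↔ anchor set of B: a cell is occupied iff some anchor covers it
def AnchorInv (blocks anchors : PySem.Set (Int × Int)) : Prop :=
  ∀ x y : Int, ((x, y) ∈ blocks ↔ ∃ q ∈ anchors, (q.1 = x ∨ q.1 + 1 = x) ∧ (q.2 = y ∨ q.2 + 1 = y))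

lemma contains_iff_mem (s : PySem.Set (Int × Int)) (p : Int × Int) :
    s.contains p = true ↔ p ∈ s := by
  simp [PySem.Set.contains]

lemma condA_iff (blocks anchors : PySem.Set (Int × Int)) (r c : Int) (hInv : AnchorInv blocks anchors) :
    (blocks.contains (r, c) || blocks.contains (r, c + 1) ||
     blocks.contains (r + 1, c) || blocks.contains (r + 1, c + 1)) = true ↔
    ∃ q ∈ anchors, (q.1 = r - 1 ∨ q.1 = r ∨ q.1 = r + 1) ∧ (q.2 = c - 1 ∨ q.2 = c ∨ q.2 = c + 1) := by
  simp only [Bool.or_eq_true, contains_iff_mem, hInv r c, hInv r (c+1), hInv (r+1) c, hInv (r+1) (c+1)]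
  constructor
  · rintro (((⟨q, hq, h1, h2⟩ | ⟨q, hq, h1, h2⟩) | ⟨q, hq, h1, h2⟩) | ⟨q, hq, h1, h2⟩) <;>
      exact ⟨q, hq, by omega, by omega⟩
  · rintro ⟨q, hq, h1, h2⟩
    rcases h1 with h1 | h1 | h1 <;> rcases h2 with h2 | h2 | h2
    · exact Or.inl (Or.inl (Or.inl ⟨q, hq, by omega, by omega⟩))
    · exact Or.inl (Or.inl (Or.inl ⟨q, hq, by omega, by omega⟩))
    · exact Or.inl (Or.inl (Or.inr ⟨q, hq, by omega, by omega⟩))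
    · exact Or.inl (Or.inl (Or.inl ⟨q, hq, by omega, by omega⟩))
    · exact Or.inl (Or.inl (Or.inl ⟨q, hq, by omega, by omega⟩))
    · exact Or.inl (Or.inl (Or.inr ⟨q, hq, by omega, by omega⟩))
    · exact Or.inl (Or.inr ⟨q, hq, by omega, by omega⟩)
    · exact Or.inl (Or.inr ⟨q, hq, by omega, by omega⟩)
    · exact Or.inr ⟨q, hq, by omega, by omega⟩

lemma condB_iff (anchors : PySem.Set (Int × Int)) (r c : Int) :
    (([-1, 0, 1] : List Int).any (fun dr =>
       ([-1, 0, 1] : List Int).any (fun dc => anchors.contains (r + dr, c + dc)))) = true ↔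
    ∃ q ∈ anchors, (q.1 = r - 1 ∨ q.1 = r ∨ q.1 = r + 1) ∧ (q.2 = c - 1 ∨ q.2 = c ∨ q.2 = c + 1) := by
  simp only [List.any_eq_true, List.mem_cons, contains_iff_mem]
  constructor
  · rintro ⟨dr, hdr, dc, hdc, hmem⟩
    refine ⟨(r + dr, c + dc), hmem, ?_, ?_⟩ <;> simp at hdr hdc <;> omega
  · rintro ⟨q, hq, h1, h2⟩
    refine ⟨q.1 - r, by simp; omega, q.2 - c, by simp; omega, ?_⟩
    simpa using hq
  
lemma loop_eq (RC : List (Int × Int)) (blocks anchors : PySem.Set (Int × Int)) (ans : Int)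
    (hInv : AnchorInv blocks anchors) :
    (RC.foldl stepA (blocks, ans)).2 = (RC.foldl stepB (anchors, ans)).2 := by
  induction RC generalizing blocks anchors ans with
  | nil => rfl
  | cons rc rest ih =>
    obtain ⟨r, c⟩ := rc
    simp only [List.foldl_cons]
    by_cases hcond : ∃ q ∈ anchors, (q.1 = r - 1 ∨ q.1 = r ∨ q.1 = r + 1) ∧ (q.2 = c - 1 ∨ q.2 = c ∨ q.2 = c + 1)
    · rw [show stepA (blocks, ans) (r, c) = (blocks, ans) by
          simp only [stepA]; rw [if_pos ((condA_iff blocks anchors r c hInv).2 hcond)],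
        show stepB (anchors, ans) (r, c) = (anchors, ans) by
          simp only [stepB]; rw [if_pos ((condB_iff anchors r c).2 hcond)]]
      exact ih blocks anchors ans hInv
    · rw [show stepA (blocks, ans) (r, c)
            = (((((blocks.add (r, c)).add (r, c + 1)).add (r + 1, c)).add (r + 1, c + 1)), ans + 1) by
          simp only [stepA]
          rw [if_neg (fun h => hcond ((condA_iff blocks anchors r c hInv).1 h))],
        show stepB (anchors, ans) (r, c) = (anchors.add (r, c), ans + 1) by
          simp only [stepB]
          rw [if_neg (fun h => hcond ((condB_iff anchors r c).1 h))]]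
      apply ih
      intro x y
      simp only [PySem.Set.mem_add, hInv x y]
      constructor
      · rintro ((((⟨q, hq, h1, h2⟩ | h) | h) | h) | h)
        · exact ⟨q, Or.inl hq, h1, h2⟩
        · rw [Prod.ext_iff] at h
          exact ⟨(r, c), Or.inr rfl, by simp; omega, by simp; omega⟩
        · rw [Prod.ext_iff] at h
          exact ⟨(r, c), Or.inr rfl, by simp; omega, by simp; omega⟩
        · rw [Prod.ext_iff] at h
          exact ⟨(r, c), Or.inr rfl, by simp; omega, by simp; omega⟩
        · rw [Prod.ext_iff] at h
          exact ⟨(r, c), Or.inr rfl, by simp; omega, by simp; omega⟩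
      · rintro ⟨q, hq | hq, h1, h2⟩
        · exact Or.inl (Or.inl (Or.inl (Or.inl ⟨q, hq, h1, h2⟩)))
        · subst hq
          simp only at h1 h2
          rcases h1 with h1 | h1 <;> rcases h2 with h2 | h2
          · exact Or.inl (Or.inl (Or.inl (Or.inr (by rw [Prod.ext_iff]; exact ⟨by omega, by omega⟩))))
          · exact Or.inl (Or.inl (Or.inr (by rw [Prod.ext_iff]; exact ⟨by omega, by omega⟩)))
          · exact Or.inl (Or.inr (by rw [Prod.ext_iff]; exact ⟨by omega, by omega⟩))
          · exact Or.inr (by rw [Prod.ext_iff]; exact ⟨by omega, by omega⟩)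

-- ===== VERDICT (by name: the statement is the Claim_ definition above) =====
theorem solve_spec : Claim_equal_solve := by
  intro RC _
  unfold Spec_solve solve solve_alt
  exact loop_eq RC PySem.Set.empty PySem.Set.empty 0 (by intro x y; simp [PySem.Set.empty])
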